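-- pv_equiv track=rewrite | github.com/lanpirot/cicd-oracle | cicd-oracle/src/main/resources/pattern-heuristics/extract_from_sql_dump.py | build_file_lex_ranks
-- ===== SOURCE A (Python) =====
-- from collections import defaultdict
--
-- def build_file_lex_ranks(files: dict) -> dict[str, str]:
--     """Compute 1-based lexicographic rank of each file within its merge."""
--     merge_files: dict[str, list[tuple[str, str]]] = defaultdict(list)
--     for fid, fd in files.items():
--         mid = fd.get('conflictingMergeReportID', '')
--         fname = fd.get('filename', '')
--         merge_files[mid].append((fname, fid))
--
--     file_lex_rank: dict[str, str] = {}
--     for items in merge_files.values():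
--         for rank, (_, fid) in enumerate(sorted(items), 1):
--             file_lex_rank[fid] = str(rank)
--     return file_lex_rank
-- ===== SOURCE B (Python) =====
-- def build_file_lex_ranks(files: dict) -> dict[str, str]:
--     """Compute 1-based lexicographic rank of each file within its merge.
--
--     Single global sort: flatten to (merge-order, filename, fid) triples,
--     sort once, then one pass with a rank counter that resets per merge."""
--     order: dict[str, int] = {}
--     triples: list[tuple[int, str, str]] = []
--     for fid, fd in files.items():
--         mid = fd.get('conflictingMergeReportID', '')
--         if mid not in order:
--             order[mid] = len(order)
--         triples.append((order[mid], fd.get('filename', ''), fid))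
--     triples.sort()
--
--     file_lex_rank: dict[str, str] = {}
--     prev = None
--     rank = 0
--     for g, _fname, fid in triples:
--         rank = rank + 1 if g == prev else 1
--         prev = g
--         file_lex_rank[fid] = str(rank)
--     return file_lex_rank
-- ===== Notes on version B (the rewrite author's own statement) =====
-- stated objective: alternative
-- what changed: Replaces the group-into-a-defaultdict-then-sort-each-group pass with one global sort of (merge-order, filename, fid) triples followed by a single pass whose rank counter resets whenever the merge changes.
import Mathlib
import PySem

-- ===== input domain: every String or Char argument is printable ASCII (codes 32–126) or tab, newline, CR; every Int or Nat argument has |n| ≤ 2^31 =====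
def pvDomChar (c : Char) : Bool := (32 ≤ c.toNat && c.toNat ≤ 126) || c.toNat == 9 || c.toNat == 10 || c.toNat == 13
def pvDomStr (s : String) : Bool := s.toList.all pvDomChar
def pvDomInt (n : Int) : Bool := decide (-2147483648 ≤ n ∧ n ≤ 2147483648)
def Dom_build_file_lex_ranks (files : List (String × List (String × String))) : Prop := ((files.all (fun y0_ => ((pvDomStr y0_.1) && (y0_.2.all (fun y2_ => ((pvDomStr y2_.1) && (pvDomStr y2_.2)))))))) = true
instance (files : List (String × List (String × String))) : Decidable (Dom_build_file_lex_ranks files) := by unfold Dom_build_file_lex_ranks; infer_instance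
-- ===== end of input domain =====

-- B replaces A's group-then-sort-each-merge passes with one global sort of (merge-order, filename, fid) triples and a single rank-resetting pass; an alternative decomposition of the same cost, proved to return the identical dict.


-- ===== PORT A =====
def build_file_lex_ranks (files : List (String × List (String × String))) : List (String × String) :=
  let merge_files : PySem.Dict String (List (String × String)) :=
    files.foldl (fun d p =>
      let fd := PySem.Dict.mk p.2
      let mid := fd.getD "conflictingMergeReportID" ""
      let fname := fd.getD "filename" ""
      d.modify mid [] (fun xs => xs ++ [(fname, p.1)])) PySem.Dict.empty
  let file_lex_rank : PySem.Dict String String :=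
    merge_files.values.foldl (fun d items =>
      (PySem.List.enumerate (PySem.List.sorted items (fun q => (toLex q : String ×ₗ String))) 1).foldl
        (fun d rp => d.insert rp.2.2 (PySem.Int.toStr rp.1)) d) PySem.Dict.empty
  file_lex_rank.items

-- ===== PORT B =====
def build_file_lex_ranks_alt (files : List (String × List (String × String))) : List (String × String) :=
  let st :=
    files.foldl (fun (acc : PySem.Dict String Int × List (Int × String × String)) p =>
      let fd := PySem.Dict.mk p.2
      let mid := fd.getD "conflictingMergeReportID" ""
      let order := if acc.1.contains mid then acc.1 else acc.1.insert mid (acc.1.size : Int)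
      (order, acc.2 ++ [(order.getD mid 0, fd.getD "filename" "", p.1)])) (PySem.Dict.empty, [])
  let sortedTriples := PySem.List.sorted st.2
      (fun t => (toLex (t.1, toLex t.2) : Int ×ₗ (String ×ₗ String)))
  let fin := sortedTriples.foldl
      (fun (s : PySem.Dict String String × Option Int × Int) t =>
        let rank := if some t.1 = s.2.1 then s.2.2 + 1 else 1
        (s.1.insert t.2.2 (PySem.Int.toStr rank), some t.1, rank))
      (PySem.Dict.empty, none, 0)
  fin.1.items

-- ===== PRECONDITION & SPEC =====
def Spec_build_file_lex_ranks (files : List (String × List (String × String))) (out : List (String × String)) : Prop := out = build_file_lex_ranks_alt files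
instance (files : List (String × List (String × String))) (out : List (String × String)) : Decidable (Spec_build_file_lex_ranks files out) := by unfold Spec_build_file_lex_ranks; infer_instance

-- ===== CLAIM (what is proved, stated in full; the proofs are below) =====
def Claim_equal_build_file_lex_ranks : Prop := ∀ (files : List (String × List (String × String))), Dom_build_file_lex_ranks files → Spec_build_file_lex_ranks files (build_file_lex_ranks files)

-- ===== LEMMAS AND PROOFS =====

-- insertBy lemmas
theorem pv_insertBy_skip {α : Type} (before : α → α → Bool) (x : α) (l1 m : List α)
    (h1 : ∀ y ∈ l1, before x y = false) :
    PySem.List.insertBy before x (l1 ++ m) = l1 ++ PySem.List.insertBy before x m := by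
  induction l1 with
  | nil => simp
  | cons a t ih =>
    simp only [List.cons_append, PySem.List.insertBy]
    rw [h1 a (by simp)]
    simp [ih (fun y hy => h1 y (by simp [hy]))]

theorem pv_insertBy_stop {α : Type} (before : α → α → Bool) (x : α) (b l2 : List α)
    (h2 : ∀ y ∈ l2, before x y = true) :
    PySem.List.insertBy before x (b ++ l2) = PySem.List.insertBy before x b ++ l2 := by
  induction b with
  | nil =>
    cases l2 with
    | nil => simp
    | cons z t => simp [PySem.List.insertBy, h2 z (by simp)]
  | cons a t ih =>
    simp only [List.cons_append, PySem.List.insertBy]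
    by_cases h : before x a = true
    · simp [h]
    · simp only [Bool.not_eq_true] at h
      simp [h, ih]

theorem pv_insertBy_map {α β : Type} (before : α → α → Bool) (before' : β → β → Bool)
    (f : α → β) (hf : ∀ a b, before' (f a) (f b) = before a b) (x : α) (l : List α) :
    PySem.List.insertBy before' (f x) (l.map f) = (PySem.List.insertBy before x l).map f := by
  induction l with
  | nil => simp [PySem.List.insertBy]
  | cons a t ih =>
    simp only [List.map_cons, PySem.List.insertBy, hf]
    by_cases h : before x a = true
    · simp [h]
    · simp only [Bool.not_eq_true] at h
      simp [h, ih]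

theorem pv_sorted_map {α β κ κ' : Type} [LT κ] [DecidableLT κ] [LT κ'] [DecidableLT κ']
    (f : α → β) (key : α → κ) (key' : β → κ')
    (hf : ∀ a b : α, (decide (key' (f a) < key' (f b))) = decide (key a < key b)) (xs : List α) :
    PySem.List.sorted (xs.map f) key' = (PySem.List.sorted xs key).map f := by
  rw [PySem.List.sorted_eq_foldl_insertBy, PySem.List.sorted_eq_foldl_insertBy]
  induction xs using List.reverseRecOn with
  | nil => simp
  | append_singleton t x ih =>
    simp only [List.map_append, List.map_cons, List.map_nil, List.foldl_append, List.foldl_cons, List.foldl_nil]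
    rw [ih, pv_insertBy_map _ _ f hf]

-- sorted of append-last
theorem pv_sorted_append_singleton {α κ : Type} [LT κ] [DecidableLT κ] (xs : List α) (x : α) (key : α → κ) :
    PySem.List.sorted (xs ++ [x]) key
      = PySem.List.insertBy (fun a b => decide (key a < key b)) x (PySem.List.sorted xs key) := by
  rw [PySem.List.sorted_eq_foldl_insertBy, PySem.List.sorted_eq_foldl_insertBy]
  simp [List.foldl_append]

-- block decomposition of a global lex sort: groups indexed 0..K-1 by g, sorted blocks concatenated
theorem pv_blocksort {α κ : Type} [LinearOrder κ] (g : α → ℤ) (w : α → κ) (K : ℕ)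
    (xs : List α) (hb : ∀ a ∈ xs, 0 ≤ g a ∧ g a < (K : ℤ)) :
    PySem.List.sorted xs (fun a => (toLex (g a, w a) : ℤ ×ₗ κ))
      = ((List.range K).map (fun (i : ℕ) =>
          PySem.List.sorted (xs.filter (fun a => g a == (i : ℤ))) (fun a => (toLex (g a, w a) : ℤ ×ₗ κ)))).flatten := by
  induction xs using List.reverseRecOn with
  | nil =>
    rw [PySem.List.sorted_eq_foldl_insertBy]
    simp [PySem.List.sorted_eq_nil_iff]
  | append_singleton t x ih =>
    have hbt : ∀ a ∈ t, 0 ≤ g a ∧ g a < (K : ℤ) := fun a ha => hb a (by simp [ha])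
    have hx := hb x (by simp)
    rw [pv_sorted_append_singleton, ih hbt]
    -- split range K at (g x).toNat
    set gx : ℕ := (g x).toNat with hgx
    have hgxK : gx < K := by omega
    have hrange : List.range K = (List.range gx ++ [gx]) ++ (List.range (K - (gx+1))).map (fun j => gx+1+j) := by
      rw [show K = (gx+1) + (K - (gx+1)) by omega, List.range_add, List.range_succ]
      have h2 : gx + 1 + (K - (gx + 1)) - (gx + 1) = K - (gx+1) := by omega
      rw [h2]
    have hgxZ : ((gx : ℕ) : ℤ) = g x := by omega
    set key : α → ℤ ×ₗ κ := fun a => (toLex (g a, w a) : ℤ ×ₗ κ) with hkey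
    set f : ℕ → List α := fun i => PySem.List.sorted (t.filter (fun a => g a == (i : ℤ))) key with hf
    set f' : ℕ → List α := fun i => PySem.List.sorted ((t ++ [x]).filter (fun a => g a == (i : ℤ))) key with hf'
    have hmemf : ∀ i y, y ∈ f i → g y = (i : ℤ) := by
      intro i y hy
      have : y ∈ t.filter (fun a => g a == (i : ℤ)) := ((PySem.List.sorted_perm _ _ _).mem_iff).1 hy
      simpa using (List.of_mem_filter this)
    have hskip : ∀ y ∈ ((List.range gx).map f).flatten, (decide (key x < key y)) = false := by
      intro y hy
      rcases List.mem_flatten.1 hy with ⟨l, hl, hyl⟩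
      rcases List.mem_map.1 hl with ⟨i, hi, rfl⟩
      have hiy := hmemf i y hyl
      have : (i : ℤ) < g x := by have := List.mem_range.1 hi; omega
      simp only [decide_eq_false_iff_not, hkey, Prod.Lex.toLex_lt_toLex]
      intro hcon
      rcases hcon with h | ⟨h1, _⟩
      · omega
      · omega
    have hstop : ∀ y ∈ (((List.range (K - (gx+1))).map (fun j => gx+1+j)).map f).flatten,
        (decide (key x < key y)) = true := by
      intro y hy
      rcases List.mem_flatten.1 hy with ⟨l, hl, hyl⟩
      rcases List.mem_map.1 hl with ⟨i, hi, rfl⟩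
      rcases List.mem_map.1 hi with ⟨j, hj, rfl⟩
      have hiy := hmemf _ y hyl
      simp only [decide_eq_true_eq, hkey, Prod.Lex.toLex_lt_toLex]
      left; omega
    have hfil : ∀ i : ℕ, (i : ℤ) ≠ g x → f' i = f i := by
      intro i hne
      simp only [hf', hf, List.filter_append]
      have : List.filter (fun a => g a == (i:ℤ)) [x] = [] := by
        simp [List.filter, show (g x == (i:ℤ)) = false by simpa using fun h => hne h.symm]
      rw [this, List.append_nil]
    have hfilx : f' gx = PySem.List.insertBy (fun a b => decide (key a < key b)) x (f gx) := by
      simp only [hf', hf, List.filter_append]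
      have : List.filter (fun a => g a == ((gx:ℕ):ℤ)) [x] = [x] := by
        simp [List.filter, show (g x == ((gx:ℕ):ℤ)) = true by simp [hgxZ]]
      rw [this, pv_sorted_append_singleton]
    rw [hrange]
    simp only [List.map_append, List.map_cons, List.map_nil, List.flatten_append, List.flatten_cons,
      List.flatten_nil, List.append_nil]
    rw [List.append_assoc, List.append_assoc]
    rw [pv_insertBy_skip (fun a b => decide (key a < key b)) x _ _ hskip,
        pv_insertBy_stop (fun a b => decide (key a < key b)) x _ _ hstop]
    congr 1
    · congr 1
      apply List.map_congr_left
      intro i hi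
      exact (hfil i (by have := List.mem_range.1 hi; omega)).symm
    congr 1
    · exact hfilx.symm
    · congr 1
      apply List.map_congr_left
      intro i hi
      rcases List.mem_map.1 hi with ⟨j, hj, rfl⟩
      exact (hfil _ (by omega)).symm

-- ===== phase 1: the order/triple-building loop of B =====

def pvOrdD (s : List String) : PySem.Dict String Int :=
  PySem.Dict.mk (s.zipIdx.map (fun q => (q.1, (q.2 : ℤ))))

theorem pv_any_zipIdx (s : List String) (m : String) (n : ℕ) :
    ((s.zipIdx n).map (fun q => (q.1, (q.2 : ℤ)))).any (fun p => p.1 == m) = s.contains m := by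
  induction s generalizing n with
  | nil => simp
  | cons a t ih =>
    simp only [List.zipIdx_cons, List.map_cons, List.any_cons, ih, List.contains_cons]
    rw [BEq.comm]

theorem pv_contains_ordD (s : List String) (m : String) :
    (pvOrdD s).contains m = s.contains m := by
  simpa [pvOrdD, PySem.Dict.contains] using pv_any_zipIdx s m 0

theorem pv_find_zipIdx (s : List String) (m : String) (n : ℕ) (h : m ∈ s) :
    List.find? (fun p => p.1 == m) ((s.zipIdx n).map (fun q => (q.1, (q.2 : ℤ))))
      = some (m, ((n + s.idxOf m : ℕ) : ℤ)) := by
  induction s generalizing n with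
  | nil => simp at h
  | cons a t ih =>
    simp only [List.zipIdx_cons, List.map_cons, List.find?_cons]
    by_cases hm : a = m
    · subst hm
      simp [List.idxOf_cons_self]
    · have hm' : (a == m) = false := by simpa using hm
      simp only [hm']
      rw [ih (n+1) (by rcases List.mem_cons.1 h with h|h; exact absurd h.symm hm; exact h)]
      congr 2
      rw [List.idxOf_cons_ne _ (by simpa using hm)]
      omega

theorem pv_get?_ordD (s : List String) (m : String) (h : m ∈ s) :
    (pvOrdD s).get? m = some ((s.idxOf m : ℕ) : ℤ) := by
  simp [pvOrdD, PySem.Dict.get?, pv_find_zipIdx s m 0 h]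

theorem pv_size_ordD (s : List String) : (pvOrdD s).size = s.length := by
  simp [pvOrdD, PySem.Dict.size]

theorem pv_update_prefix (l : List String) (s : List String) :
    ∃ r, PySem.Set.update s l = s ++ r := by
  induction l generalizing s with
  | nil => exact ⟨[], by simp [PySem.Set.update]⟩
  | cons x l ih =>
    have hstep : PySem.Set.update s (x :: l) = PySem.Set.update (PySem.Set.add s x) l := rfl
    rcases ih (PySem.Set.add s x) with ⟨r, hr⟩
    by_cases hx : x ∈ s
    · exact ⟨r, by rw [hstep, hr, PySem.Set.add_of_mem hx]⟩
    · exact ⟨[x] ++ r, by rw [hstep, hr, PySem.Set.add_of_not_mem hx, List.append_assoc]⟩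

theorem pv_idxOf_update (l s : List String) (m : String) (h : m ∈ s) :
    List.idxOf m (PySem.Set.update s l) = List.idxOf m s := by
  rcases pv_update_prefix l s with ⟨r, hr⟩
  rw [hr]
  exact List.idxOf_append_of_mem h

def pvMid (p : String × List (String × String)) : String :=
  (PySem.Dict.mk p.2).getD "conflictingMergeReportID" ""

def pvName (p : String × List (String × String)) : String :=
  (PySem.Dict.mk p.2).getD "filename" ""

def pvStepB (acc : PySem.Dict String Int × List (ℤ × String × String))
    (p : String × List (String × String)) :
    PySem.Dict String Int × List (ℤ × String × String) :=
  let order := if acc.1.contains (pvMid p) then acc.1 else acc.1.insert (pvMid p) (acc.1.size : Int)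
  (order, acc.2 ++ [(order.getD (pvMid p) 0, pvName p, p.1)])

theorem pv_phase1 (l : List (String × List (String × String))) (s : List String) (hs : s.Nodup)
    (ts : List (ℤ × String × String)) :
    l.foldl pvStepB (pvOrdD s, ts)
      = (pvOrdD (PySem.Set.update s (l.map pvMid)),
         ts ++ l.map (fun p =>
           (((List.idxOf (pvMid p) (PySem.Set.update s (l.map pvMid)) : ℕ) : ℤ), pvName p, p.1))) := by
  induction l generalizing s ts with
  | nil => simp [PySem.Set.update]
  | cons p l ih =>
    have hU : PySem.Set.update s ((p :: l).map pvMid)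
        = PySem.Set.update (PySem.Set.add s (pvMid p)) (l.map pvMid) := rfl
    by_cases hm : pvMid p ∈ s
    · have hc : (pvOrdD s).contains (pvMid p) = true := by
        rw [pv_contains_ordD]; simpa [List.contains_eq_mem]
      have hstep : pvStepB (pvOrdD s, ts) p
          = (pvOrdD s, ts ++ [(((List.idxOf (pvMid p) s : ℕ) : ℤ), pvName p, p.1)]) := by
        simp only [pvStepB, hc, if_true]
        have : (pvOrdD s).getD (pvMid p) 0 = ((List.idxOf (pvMid p) s : ℕ) : ℤ) := by
          simp [PySem.Dict.getD, pv_get?_ordD s _ hm]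
        rw [this]
      rw [List.foldl_cons, hstep, ih s hs, hU, PySem.Set.add_of_mem hm]
      refine Prod.ext rfl ?_
      simp only [List.map_cons, List.append_assoc, List.singleton_append]
      rw [pv_idxOf_update _ _ _ hm]
    · have hc : (pvOrdD s).contains (pvMid p) = false := by
        rw [pv_contains_ordD]; simpa [List.contains_eq_mem]
      have hins : (pvOrdD s).insert (pvMid p) ((pvOrdD s).size : ℤ) = pvOrdD (s ++ [pvMid p]) := by
        simp only [PySem.Dict.insert, hc, Bool.false_eq_true, if_false, pv_size_ordD]
        simp [pvOrdD, List.zipIdx_append]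
      have hmem' : pvMid p ∈ s ++ [pvMid p] := by simp
      have hidx : List.idxOf (pvMid p) (s ++ [pvMid p]) = s.length := by
        rw [List.idxOf_append_of_notMem hm]
        simp
      have hstep : pvStepB (pvOrdD s, ts) p
          = (pvOrdD (s ++ [pvMid p]),
             ts ++ [(((List.idxOf (pvMid p) (s ++ [pvMid p]) : ℕ) : ℤ), pvName p, p.1)]) := by
        simp only [pvStepB, hc, Bool.false_eq_true, if_false]
        rw [hins]
        have : (pvOrdD (s ++ [pvMid p])).getD (pvMid p) 0
            = ((List.idxOf (pvMid p) (s ++ [pvMid p]) : ℕ) : ℤ) := by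
          simp [PySem.Dict.getD, pv_get?_ordD (s ++ [pvMid p]) _ hmem']
        rw [this]
      rw [List.foldl_cons, hstep,
          ih (s ++ [pvMid p]) (by refine List.Nodup.append hs (List.nodup_singleton _) ?_; intro a ha hb; rw [List.mem_singleton] at hb; exact hm (hb ▸ ha)) _,
          hU, PySem.Set.add_of_not_mem hm]
      refine Prod.ext rfl ?_
      simp only [List.map_cons, List.append_assoc, List.singleton_append]
      rw [pv_idxOf_update _ _ _ hmem']

-- ===== phase 3: the rank-reset pass of B over sorted blocks =====

def pvStepR (st : PySem.Dict String String × Option ℤ × ℤ) (t : ℤ × String × String) :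
    PySem.Dict String String × Option ℤ × ℤ :=
  let rank := if some t.1 = st.2.1 then st.2.2 + 1 else 1
  (st.1.insert t.2.2 (PySem.Int.toStr rank), some t.1, rank)

def pvIns (d : PySem.Dict String String) (pr : String × String) : PySem.Dict String String :=
  d.insert pr.1 pr.2

def pvPairs (ws : List (String × String)) (s : ℤ) : List (String × String) :=
  (PySem.List.enumerate ws s).map (fun rp => (rp.2.2, PySem.Int.toStr rp.1))

theorem pv_rank_within (c : ℤ) (ws : List (String × String)) (d : PySem.Dict String String)
    (r : ℤ) :
    (ws.map (fun w => (c, w))).foldl pvStepR (d, some c, r)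
      = ((pvPairs ws (r+1)).foldl pvIns d, some c, r + (ws.length : ℤ)) := by
  induction ws generalizing d r with
  | nil => simp [pvPairs, PySem.List.enumerate_nil]
  | cons w ws ih =>
    simp only [List.map_cons, List.foldl_cons]
    have hstep : pvStepR (d, some c, r) (c, w)
        = (d.insert w.2 (PySem.Int.toStr (r+1)), some c, r+1) := by
      simp [pvStepR]
    rw [hstep, ih]
    simp only [pvPairs, PySem.List.enumerate_cons, List.map_cons, List.foldl_cons, pvIns]
    refine Prod.ext rfl (Prod.ext rfl ?_)
    simp only [List.length_cons]
    push_cast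
    ring

theorem pv_rank_entry (c : ℤ) (ws : List (String × String)) (d : PySem.Dict String String)
    (prev : Option ℤ) (r : ℤ) (hne : prev ≠ some c) (hw : ws ≠ []) :
    (ws.map (fun w => (c, w))).foldl pvStepR (d, prev, r)
      = ((pvPairs ws 1).foldl pvIns d, some c, (ws.length : ℤ)) := by
  cases ws with
  | nil => exact absurd rfl hw
  | cons w ws =>
    simp only [List.map_cons, List.foldl_cons]
    have hstep : pvStepR (d, prev, r) (c, w)
        = (d.insert w.2 (PySem.Int.toStr 1), some c, 1) := by
      simp only [pvStepR]
      rw [if_neg (fun h => hne h.symm)]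
    rw [hstep, pv_rank_within]
    simp only [pvPairs, PySem.List.enumerate_cons, List.map_cons, List.foldl_cons, pvIns]
    refine Prod.ext rfl (Prod.ext rfl ?_)
    simp only [List.length_cons]
    push_cast
    omega

theorem pv_rank_outer (L : List (ℤ × List (String × String))) (d : PySem.Dict String String)
    (prev : Option ℤ) (r : ℤ) (hne : ∀ b ∈ L.head?, prev ≠ some b.1)
    (hnil : ∀ b ∈ L, b.2 ≠ []) (hch : L.IsChain (fun a b => a.1 ≠ b.1)) :
    (((L.map (fun b => b.2.map (fun w => (b.1, w)))).flatten).foldl pvStepR (d, prev, r)).1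
      = ((L.map (fun b => pvPairs b.2 1)).flatten).foldl pvIns d := by
  induction L generalizing d prev r with
  | nil => simp
  | cons b L ih =>
    simp only [List.map_cons, List.flatten_cons, List.foldl_append]
    rw [pv_rank_entry b.1 b.2 d prev r (hne b rfl) (hnil b (by simp))]
    exact ih _ _ _
      (by intro b' hb'; cases L with
          | nil => simp at hb'
          | cons b'' L' =>
            simp only [List.head?_cons, Option.mem_some_iff] at hb'
            subst hb'
            have := (List.isChain_cons_cons.1 hch).1
            exact fun h => this (by simpa using h))
      (fun b' hb' => hnil b' (by simp [hb']))
      (List.IsChain.of_cons hch)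

-- ===== shared vocabulary for the two characterizations =====

def pvKeyW (q : String × String) : Lex (String × String) := toLex q

def pvM (files : List (String × List (String × String))) : List String :=
  PySem.Set.update ([] : PySem.Set String) (files.map pvMid)

def pvG (files : List (String × List (String × String))) (k : String) : List (String × String) :=
  (files.filter (fun p => pvMid p == k)).map (fun p => (pvName p, p.1))

def pvSeq (files : List (String × List (String × String))) : List (String × String) :=
  ((pvM files).map (fun k => pvPairs (PySem.List.sorted (pvG files k) pvKeyW) 1)).flatten

def pvA (files : List (String × List (String × String))) : List (String × String) :=
  ((pvSeq files).foldl pvIns PySem.Dict.empty).items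

theorem pv_range_map {β : Type} (u : List String) (F : String → β) :
    (List.range u.length).map (fun i => F (u.getD i "")) = u.map F := by
  induction u using List.reverseRecOn with
  | nil => simp
  | append_singleton t x ih =>
    rw [List.length_append, List.length_cons, List.length_nil, Nat.add_zero, List.range_succ]
    rw [List.map_append, List.map_append]
    congr 1
    · rw [← ih]
      apply List.map_congr_left
      intro i hi
      rw [List.getD_append t [x] "" i (List.mem_range.1 hi)]
    · simp only [List.map_cons, List.map_nil]
      congr 2
      rw [List.getD_eq_getElem _ _ (by simp)]
      simp

def pvMerge (files : List (String × List (String × String))) :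
    PySem.Dict String (List (String × String)) :=
  files.foldl (fun d p => d.modify (pvMid p) [] (fun xs => xs ++ [(pvName p, p.1)])) PySem.Dict.empty

theorem pv_A_char (files : List (String × List (String × String))) :
    build_file_lex_ranks files = pvA files := by
  have h0 : build_file_lex_ranks files
      = ((pvMerge files).values.foldl (fun d items =>
          (PySem.List.enumerate (PySem.List.sorted items pvKeyW) 1).foldl
            (fun d rp => pvIns d (rp.2.2, PySem.Int.toStr rp.1)) d) PySem.Dict.empty).items := rfl
  have hkeys : (pvMerge files).keys = pvM files := by
    have := PySem.Dict.keys_foldl_modify_key files pvMid ([] : List (String × String))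
      (fun _ p => fun xs => xs ++ [(pvName p, p.1)]) (PySem.Dict.empty : PySem.Dict String (List (String × String)))
    rw [PySem.Dict.keys_empty] at this
    exact this
  have hnodup : (pvMerge files).keys.Nodup := by
    rw [hkeys]
    exact PySem.Set.nodup_update _ _ (List.nodup_nil)
  have hgetD : ∀ k, (pvMerge files).getD k [] = pvG files k := by
    intro k
    have h1 : pvMerge files
        = (files.map (fun p => (pvMid p, (pvName p, p.1)))).foldl
            (fun d q => d.modify q.1 [] (fun xs => xs ++ [q.2])) PySem.Dict.empty := by
      rw [List.foldl_map]; rfl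
    rw [h1, PySem.Dict.getD_foldl_modify_append]
    rw [List.filter_map, List.map_map]
    simp only [pvG, Function.comp_def]
    rfl
  have hvals : (pvMerge files).values
      = (pvM files).map (fun k => pvG files k) := by
    rw [PySem.Dict.values_eq_map_keys _ hnodup ([] : List (String × String)), hkeys]
    exact List.map_congr_left (fun k _ => hgetD k)
  rw [h0, hvals]
  rw [List.foldl_map]
  unfold pvA pvSeq
  rw [List.foldl_flatten, List.foldl_map]
  apply congrArg
  apply PySem.List.foldl_congr_mem
  intro d k hk
  simp only [pvPairs, List.foldl_map]

theorem pv_B_char (files : List (String × List (String × String))) :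
    build_file_lex_ranks_alt files = pvA files := by
  have h0 : build_file_lex_ranks_alt files
      = ((PySem.List.sorted (files.foldl pvStepB (pvOrdD [], [])).2
            (fun t => (toLex (t.1, toLex t.2) : Lex (ℤ × Lex (String × String))))).foldl
          pvStepR (PySem.Dict.empty, none, 0)).1.items := rfl
  set U := pvM files with hUdef
  set keyT : (ℤ × String × String) → Lex (ℤ × Lex (String × String)) :=
    (fun t => (toLex (t.1, toLex t.2) : Lex (ℤ × Lex (String × String)))) with hkeyT
  have h1 : (files.foldl pvStepB (pvOrdD [], [])).2
      = files.map (fun p => (((List.idxOf (pvMid p) U : ℕ) : ℤ), pvName p, p.1)) := by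
    rw [pv_phase1 files [] List.nodup_nil []]
    simp [hUdef, pvM]
  set trips := files.map (fun p => (((List.idxOf (pvMid p) U : ℕ) : ℤ), pvName p, p.1)) with htrips
  have hmemU : ∀ p ∈ files, pvMid p ∈ U := by
    intro p hp
    rw [hUdef, pvM]
    exact (PySem.Set.mem_update _ _ _).2 (Or.inr (List.mem_map_of_mem hp))
  have hb : ∀ a ∈ trips, 0 ≤ a.1 ∧ a.1 < (U.length : ℤ) := by
    intro a ha
    rcases List.mem_map.1 ha with ⟨p, hp, rfl⟩
    have hlt := List.idxOf_lt_length_of_mem (hmemU p hp)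
    refine ⟨by simp, ?_⟩
    show ((List.idxOf (pvMid p) U : ℕ) : ℤ) < (U.length : ℤ)
    exact_mod_cast hlt
  have h2 : PySem.List.sorted trips keyT
      = ((List.range U.length).map (fun i =>
          PySem.List.sorted (trips.filter (fun a => a.1 == ((i : ℕ) : ℤ))) keyT)).flatten :=
    pv_blocksort (fun t => t.1) (fun t => toLex t.2) U.length trips hb
  have hUnodup : U.Nodup := PySem.Set.nodup_update _ _ List.nodup_nil
  have h3 : ∀ i, i < U.length → trips.filter (fun a => a.1 == ((i : ℕ) : ℤ))
      = (pvG files (U.getD i "")).map (fun w => (((i : ℕ) : ℤ), w.1, w.2)) := by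
    intro i hi
    rw [htrips, List.filter_map]
    have hpred : ∀ p ∈ files,
        (((List.idxOf (pvMid p) U : ℕ) : ℤ) == ((i : ℕ) : ℤ)) = (pvMid p == U.getD i "") := by
      intro p hp
      rw [List.getD_eq_getElem U "" hi]
      by_cases h : List.idxOf (pvMid p) U = i
      · have : pvMid p = U[i] := by
          subst h
          exact (List.getElem_idxOf (List.idxOf_lt_length_of_mem (hmemU p hp))).symm
        simp [this, hUnodup.idxOf_getElem i hi]
      · have : pvMid p ≠ U[i] := by
          intro he
          exact h (by rw [he]; exact hUnodup.idxOf_getElem i hi)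
        simp [h, this]
    rw [show ((fun a : ℤ × String × String => a.1 == ((i : ℕ) : ℤ)) ∘
          (fun p : String × List (String × String) =>
            (((List.idxOf (pvMid p) U : ℕ) : ℤ), pvName p, p.1)))
        = (fun p => (((List.idxOf (pvMid p) U : ℕ) : ℤ) == ((i : ℕ) : ℤ))) from rfl]
    rw [List.filter_congr hpred]
    have hmapped : ∀ p ∈ files.filter (fun p => pvMid p == U.getD i ""),
        ((fun p => (((List.idxOf (pvMid p) U : ℕ) : ℤ), pvName p, p.1)) p)
          = (((i : ℕ) : ℤ), pvName p, p.1) := by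
      intro p hp
      have h1 := (List.mem_filter.1 hp).2
      have h2 : pvMid p = U.getD i "" := by simpa using h1
      rw [List.getD_eq_getElem U "" hi] at h2
      show (((List.idxOf (pvMid p) U : ℕ) : ℤ), pvName p, p.1) = (((i : ℕ) : ℤ), pvName p, p.1)
      rw [h2, hUnodup.idxOf_getElem i hi]
    rw [List.map_congr_left hmapped, pvG, List.map_map]
    rfl
  have h4 : ∀ i : ℕ, PySem.List.sorted ((pvG files (U.getD i "")).map
        (fun w => (((i : ℕ) : ℤ), w.1, w.2))) keyT
      = (PySem.List.sorted (pvG files (U.getD i "")) pvKeyW).map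
          (fun w => (((i : ℕ) : ℤ), w.1, w.2)) := by
    intro i
    apply pv_sorted_map (fun w => (((i : ℕ) : ℤ), w.1, w.2)) pvKeyW keyT
    intro a b
    simp [hkeyT, pvKeyW, Prod.Lex.toLex_lt_toLex]
  set F : String → List (String × String) :=
    fun k => pvPairs (PySem.List.sorted (pvG files k) pvKeyW) 1 with hFdef
  rw [h0, h1, h2]
  have h5 : (List.range U.length).map (fun i =>
        PySem.List.sorted (trips.filter (fun a => a.1 == ((i : ℕ) : ℤ))) keyT)
      = (List.range U.length).map (fun i =>
          (PySem.List.sorted (pvG files (U.getD i "")) pvKeyW).map (fun w => (((i : ℕ) : ℤ), w))) := by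
    apply List.map_congr_left
    intro i hi
    rw [h3 i (List.mem_range.1 hi), h4 i]
  set L : List (ℤ × List (String × String)) :=
    (List.range U.length).map (fun i =>
      (((i : ℕ) : ℤ), PySem.List.sorted (pvG files (U.getD i "")) pvKeyW)) with hL
  have h6 : (List.range U.length).map (fun i =>
        (PySem.List.sorted (pvG files (U.getD i "")) pvKeyW).map (fun w => (((i : ℕ) : ℤ), w)))
      = L.map (fun b => b.2.map (fun w => (b.1, w))) := by
    rw [hL, List.map_map]
    rfl
  have hneL : ∀ b ∈ L.head?, (none : Option ℤ) ≠ some b.1 := by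
    intro b _
    simp
  have hnilL : ∀ b ∈ L, b.2 ≠ [] := by
    intro b hb
    rcases List.mem_map.1 hb with ⟨i, hi, rfl⟩
    have hilen : i < U.length := List.mem_range.1 hi
    simp only [ne_eq, PySem.List.sorted_eq_nil_iff]
    intro hEmpty
    have hkU : U.getD i "" ∈ U := by
      rw [List.getD_eq_getElem U "" hilen]
      exact List.getElem_mem hilen
    have : U.getD i "" ∈ files.map pvMid := by
      rcases (PySem.Set.mem_update ([] : PySem.Set String) (files.map pvMid) _).1 hkU with h | h
      · exact absurd h (List.not_mem_nil)
      · exact h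
    rcases List.mem_map.1 this with ⟨p, hp, hpk⟩
    have hpf : (pvName p, p.1) ∈ pvG files (U.getD i "") :=
      List.mem_map_of_mem (List.mem_filter.2 ⟨hp, by simp [hpk]⟩)
    rw [hEmpty] at hpf
    exact absurd hpf (List.not_mem_nil)
  have hchL : L.IsChain (fun a b => a.1 ≠ b.1) := by
    rw [hL]
    exact List.isChain_map_of_isChain
      (fun i : ℕ => ((((i : ℕ)) : ℤ), PySem.List.sorted (pvG files (U.getD i "")) pvKeyW))
      (fun a b h => h)
      (List.Pairwise.isChain (List.pairwise_lt_range.imp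
        (by intro a b h; simp only [ne_eq, Nat.cast_inj]; omega)))
  rw [h5, h6, pv_rank_outer L PySem.Dict.empty none 0 hneL hnilL hchL]
  have h7 : L.map (fun b => pvPairs b.2 1) = (pvM files).map F := by
    rw [hL, List.map_map]
    exact pv_range_map U F
  rw [h7]
  rfl

-- ===== VERDICT (by name: the statement is the Claim_ definition above) =====
theorem build_file_lex_ranks_spec : Claim_equal_build_file_lex_ranks := by
  intro files _
  unfold Spec_build_file_lex_ranks
  rw [pv_A_char, pv_B_char]
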